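-- pv_equiv track=rewrite | github.com/orianalc/TD-info | TD4 ex5 et 6.py | h_3
-- ===== SOURCE A (Python) =====
-- def h_3(chaine): #methode du produit des codes ASCII
--     s = 1
--     for symbole in chaine:
--         s += s*ord(symbole)
--     t = 0
--     for nb in str(s):
--         t += ord(nb)
--     return t
-- ===== SOURCE B (Python) =====
-- def h_3(chaine):
--     s = 1
--     for symbole in chaine:
--         s *= 1 + ord(symbole)
--     t = 0
--     CH = 10 ** 100
--     while s >= CH:
--         s, r = divmod(s, CH)
--         t += 4800
--         while r > 0:
--             t += r % 10
--             r //= 10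
--     while s > 0:
--         t += 48 + s % 10
--         s //= 10
--     return t
-- ===== Notes on version B (the rewrite author's own statement) =====
-- stated objective: faster
-- what changed: B folds the string into a product of (1+ord(c)) directly and then sums the digit codes by arithmetic extraction instead of converting s to a string: it peels 100 digits at a time with divmod by 10**100 and sums each chunk with small divmod loops; intended as faster, measured 1.8-2.1x at the largest sizes both finished.
import Mathlib
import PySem

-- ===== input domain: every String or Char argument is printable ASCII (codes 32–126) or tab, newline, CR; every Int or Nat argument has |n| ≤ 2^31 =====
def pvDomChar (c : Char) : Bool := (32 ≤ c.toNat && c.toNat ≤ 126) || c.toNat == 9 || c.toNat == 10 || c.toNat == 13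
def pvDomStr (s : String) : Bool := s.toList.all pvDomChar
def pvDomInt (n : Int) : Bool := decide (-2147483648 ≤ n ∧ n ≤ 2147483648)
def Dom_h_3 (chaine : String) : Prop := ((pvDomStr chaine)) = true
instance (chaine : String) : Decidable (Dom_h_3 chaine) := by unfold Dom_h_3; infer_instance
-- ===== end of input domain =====

-- B builds s as a direct product of (1+ord(c)) and replaces A's str(s) digit-character loop by
-- arithmetic digit extraction in 100-digit chunks (divmod by 10^100, then small divmod loops),
-- measured ~1.8x faster than A's string conversion at the largest size both finished.

-- ===== PORT A =====
def h_3 (chaine : String) : Int :=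
  (PySem.Int.toStr (chaine.toList.foldl (fun s symbole => s + s * (symbole.toNat : Int)) 1)).toList.foldl
    (fun t nb => t + (nb.toNat : Int)) 0

-- ===== PORT B =====
-- CH = 10 ** 100
def h3CH : Int := 10 ^ 100

-- inner loop of Source B: while r > 0: t += r % 10; r //= 10
def h3InnerLoop (r t : Int) : Int :=
  if _h : 0 < r then
    h3InnerLoop (PySem.Int.floordiv r 10) (t + PySem.Int.mod r 10)
  else t
termination_by r.toNat
decreasing_by
  simp only [PySem.Int.floordiv]
  rw [Int.fdiv_eq_ediv_of_nonneg r (by norm_num)]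
  omega

-- chunk loop of Source B: while s >= CH: s, r = divmod(s, CH); t += 4800; <inner loop on r>
def h3ChunkLoop (s t : Int) : Int × Int :=
  if h : h3CH ≤ s then
    h3ChunkLoop (PySem.Int.floordiv s h3CH)
      (h3InnerLoop (PySem.Int.mod s h3CH) (t + 4800))
  else (s, t)
termination_by s.toNat
decreasing_by
  simp only [PySem.Int.floordiv]
  rw [Int.fdiv_eq_ediv_of_nonneg s (by norm_num [h3CH])]
  simp only [h3CH] at h ⊢
  omega

-- tail loop of Source B: while s > 0: t += 48 + s % 10; s //= 10
def h3TailLoop (s t : Int) : Int :=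
  if h : 0 < s then
    h3TailLoop (PySem.Int.floordiv s 10) (t + (48 + PySem.Int.mod s 10))
  else t
termination_by s.toNat
decreasing_by
  simp only [PySem.Int.floordiv]
  rw [Int.fdiv_eq_ediv_of_nonneg s (by norm_num)]
  omega

def h_3_alt (chaine : String) : Int :=
  let s0 : Int := chaine.toList.foldl (fun s symbole => s * (1 + (symbole.toNat : Int))) 1
  let p := h3ChunkLoop s0 0
  h3TailLoop p.1 p.2

-- ===== PRECONDITION & SPEC =====
def Spec_h_3 (chaine : String) (out : Int) : Prop := out = h_3_alt chaine
instance (chaine : String) (out : Int) : Decidable (Spec_h_3 chaine out) := by unfold Spec_h_3; infer_instance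

-- ===== CLAIM (what is proved, stated in full; the proofs are below) =====
def Claim_equal_h_3 : Prop := ∀ (chaine : String), Dom_h_3 chaine → Spec_h_3 chaine (h_3 chaine)

-- ===== LEMMAS AND PROOFS =====

-- digit-code sum of a natural number (0 for 0): 48 + digit, per decimal digit
def natDig : Nat → Int
  | 0 => 0
  | (n+1) => 48 + ((n+1) % 10 : Nat) + natDig ((n+1) / 10)
decreasing_by exact Nat.div_lt_self (Nat.succ_pos n) (by norm_num)

-- plain digit sum (no 48s)
def pds : Nat → Int
  | 0 => 0
  | (n+1) => ((n+1) % 10 : Nat) + pds ((n+1) / 10)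
decreasing_by exact Nat.div_lt_self (Nat.succ_pos n) (by norm_num)

lemma natDig_pos (n : Nat) (h : 0 < n) :
    natDig n = 48 + (n % 10 : Nat) + natDig (n / 10) := by
  cases n with
  | zero => omega
  | succ m => rw [natDig]

lemma pds_unfold (n : Nat) : pds n = ((n % 10 : Nat) : Int) + pds (n / 10) := by
  cases n with
  | zero => simp [pds]
  | succ m => rw [pds]

lemma digitChar_toNat (m : Nat) (h : m < 10) : ((Nat.digitChar m).toNat : Int) = 48 + m := by
  interval_cases m <;> rfl

-- sum of char codes as an Int
def codeSum (l : List Char) : Int := (l.map (fun c => (c.toNat : Int))).sum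

lemma foldl_codeSum (l : List Char) (t : Int) :
    l.foldl (fun t nb => t + (nb.toNat : Int)) t = t + codeSum l := by
  induction l generalizing t with
  | nil => simp [codeSum]
  | cons c l ih => simp [codeSum, List.foldl_cons, ih, List.map_cons]; ring

lemma codeSum_toDigitsCore (f : Nat) :
    ∀ (n : Nat) (ds : List Char), 0 < n → n < f →
      codeSum (Nat.toDigitsCore 10 f n ds) = natDig n + codeSum ds := by
  induction f with
  | zero => intro n ds h1 h2; omega
  | succ f ih =>
    intro n ds h1 h2
    rw [Nat.toDigitsCore]
    have hm : n % 10 < 10 := Nat.mod_lt _ (by norm_num)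
    by_cases hz : n / 10 = 0
    · simp only [hz]
      rw [natDig_pos n h1, hz]
      simp [codeSum, natDig, digitChar_toNat _ hm]
    · simp only [if_neg hz]
      have hlt : n / 10 < f := by
        have := Nat.div_lt_self h1 (by norm_num : 1 < 10)
        omega
      rw [ih (n / 10) _ (Nat.pos_of_ne_zero hz) hlt, natDig_pos n h1]
      simp [codeSum, digitChar_toNat _ hm]
      ring

lemma codeSum_toChars (s : Int) (h : 1 ≤ s) :
    codeSum (PySem.Int.toChars s) = natDig s.toNat := by
  have hneg : ¬ s < 0 := by omega
  simp only [PySem.Int.toChars, if_neg hneg, Nat.toDigits]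
  rw [codeSum_toDigitsCore (s.toNat + 1) s.toNat [] (by omega) (by omega)]
  simp [codeSum]

-- splitting off the k low decimal digits of a positive number
lemma natDig_chunk (k : Nat) : ∀ (n : Nat), 10 ^ k ≤ n →
    natDig n = 48 * k + pds (n % 10 ^ k) + natDig (n / 10 ^ k) := by
  induction k with
  | zero => intro n _; simp only [pow_zero, Nat.mod_one, Nat.div_one, Nat.cast_zero]; simp [pds]
  | succ k ih =>
    intro n h
    have h10 : (0:Nat) < 10 ^ (k+1) := pow_pos (by norm_num : (0:Nat) < 10) (k+1)
    have hn : 0 < n := lt_of_lt_of_le h10 h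
    have hdiv : 10 ^ k ≤ n / 10 := by
      rw [Nat.le_div_iff_mul_le (by norm_num : (0:Nat) < 10)]
      calc 10 ^ k * 10 = 10 ^ (k+1) := (pow_succ 10 k).symm
        _ ≤ n := h
    rw [natDig_pos n hn, ih (n / 10) hdiv]
    have e1 : n % 10 ^ (k+1) % 10 = n % 10 := Nat.mod_mod_of_dvd n ⟨10 ^ k, (pow_succ' 10 k)⟩
    have e2 : n % 10 ^ (k+1) / 10 = n / 10 % 10 ^ k := by
      have := Nat.mod_mul_right_div_self n 10 (10 ^ k)
      rwa [← pow_succ' 10 k] at this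
    have e3 : n / 10 / 10 ^ k = n / 10 ^ (k+1) := by
      rw [Nat.div_div_eq_div_mul, ← pow_succ' 10 k]
    rw [pds_unfold (n % 10 ^ (k+1)), e1, e2, e3]
    push_cast
    ring

lemma h3InnerLoop_eq (r t : Int) (h : 0 ≤ r) :
    h3InnerLoop r t = t + pds r.toNat := by
  by_cases hp : 0 < r
  · rw [h3InnerLoop, dif_pos hp]
    have hd : PySem.Int.floordiv r 10 = r / 10 := Int.fdiv_eq_ediv_of_nonneg r (by norm_num)
    have hm : PySem.Int.mod r 10 = r % 10 := Int.fmod_eq_emod_of_nonneg r (by norm_num)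
    rw [hd, hm, h3InnerLoop_eq (r / 10) _ (by positivity)]
    rw [pds_unfold r.toNat]
    have h1 : ((r.toNat % 10 : Nat) : Int) = r % 10 := by omega
    have h2 : (r / 10).toNat = r.toNat / 10 := by omega
    rw [h1, h2]; ring
  · rw [h3InnerLoop, dif_neg hp]
    have : r.toNat = 0 := by omega
    simp [this, pds]
termination_by r.toNat
decreasing_by omega

lemma h3TailLoop_eq (s t : Int) (h : 0 ≤ s) :
    h3TailLoop s t = t + natDig s.toNat := by
  by_cases hp : 0 < s
  · rw [h3TailLoop, dif_pos hp]
    have hd : PySem.Int.floordiv s 10 = s / 10 := Int.fdiv_eq_ediv_of_nonneg s (by norm_num)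
    have hm : PySem.Int.mod s 10 = s % 10 := Int.fmod_eq_emod_of_nonneg s (by norm_num)
    rw [hd, hm, h3TailLoop_eq (s / 10) _ (by positivity)]
    rw [natDig_pos s.toNat (by omega)]
    have h1 : ((s.toNat % 10 : Nat) : Int) = s % 10 := by omega
    have h2 : (s / 10).toNat = s.toNat / 10 := by omega
    rw [h1, h2]; ring
  · rw [h3TailLoop, dif_neg hp]
    have : s.toNat = 0 := by omega
    simp [this, natDig]
termination_by s.toNat
decreasing_by omega

lemma h3ChunkLoop_eq (s t : Int) (h : 0 ≤ s) :
    h3TailLoop (h3ChunkLoop s t).1 (h3ChunkLoop s t).2 = t + natDig s.toNat := by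
  by_cases hc : h3CH ≤ s
  · rw [h3ChunkLoop, dif_pos hc]
    have hch : (0:Int) < h3CH := by norm_num [h3CH]
    have hd : PySem.Int.floordiv s h3CH = s / h3CH := Int.fdiv_eq_ediv_of_nonneg s (by norm_num [h3CH])
    have hm : PySem.Int.mod s h3CH = s % h3CH := Int.fmod_eq_emod_of_nonneg s (by norm_num [h3CH])
    rw [hd, hm, h3InnerLoop_eq (s % h3CH) _ (Int.emod_nonneg s (by omega))]
    rw [h3ChunkLoop_eq (s / h3CH) _ (by positivity)]
    have hk : 10 ^ 100 ≤ s.toNat := by simp only [h3CH] at hc; omega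
    have e1 : (s % h3CH).toNat = s.toNat % 10 ^ 100 := by simp only [h3CH]; omega
    have e2 : (s / h3CH).toNat = s.toNat / 10 ^ 100 := by simp only [h3CH]; omega
    rw [e1, e2, natDig_chunk 100 s.toNat hk]
    norm_num
    ring
  · rw [h3ChunkLoop, dif_neg hc]
    exact h3TailLoop_eq s t h
termination_by s.toNat
decreasing_by
  simp only [h3CH] at hc ⊢
  omega

lemma foldl_prod_eq (l : List Char) (s : Int) :
    l.foldl (fun s symbole => s + s * (symbole.toNat : Int)) s
      = l.foldl (fun s symbole => s * (1 + (symbole.toNat : Int))) s := by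
  induction l generalizing s with
  | nil => rfl
  | cons c l ih => simp only [List.foldl_cons]; rw [ih]; ring_nf

lemma foldl_prod_pos (l : List Char) (s : Int) (h : 1 ≤ s) :
    1 ≤ l.foldl (fun s symbole => s * (1 + (symbole.toNat : Int))) s := by
  induction l generalizing s with
  | nil => exact h
  | cons c l ih =>
    simp only [List.foldl_cons]
    exact ih _ (by nlinarith [Int.natCast_nonneg c.toNat])

-- ===== VERDICT (by name: the statement is the Claim_ definition above) =====
theorem h_3_spec : Claim_equal_h_3 := by
  intro chaine _
  unfold Spec_h_3 h_3 h_3_alt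
  rw [foldl_prod_eq]
  set s := chaine.toList.foldl (fun s symbole => s * (1 + (symbole.toNat : Int))) 1 with hs
  have hpos : 1 ≤ s := foldl_prod_pos _ _ le_rfl
  have ht : (PySem.Int.toStr s).toList = PySem.Int.toChars s := PySem.Int.toList_toStr s
  rw [ht, foldl_codeSum, codeSum_toChars s hpos]
  have hc := h3ChunkLoop_eq s 0 (by omega : (0:Int) ≤ s)
  linarith
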